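-- pv_equiv track=rewrite | github.com/pavlin-policar/rosalind | sseq.py | subsequences
-- ===== SOURCE A (Python) =====
-- from collections import defaultdict
--
-- def get_traceback(traceback, seed, limit=None):
--     if not len(traceback[seed]):
--         return [[]]
--
--     new_paths = []
--     for new_seed in traceback[seed][:limit]:
--         sub_paths = get_traceback(traceback, new_seed)
--         for p in sub_paths[:limit]:
--             new_paths.append(p + [seed[1]])
--
--     return new_paths
--
-- def subsequences(string, subsequence, limit=1):
--     dpt = defaultdict(int)
--     dpt[-1, -1] = 1
--
--     traceback = defaultdict(list)
--
--     # Build up dynamic programming table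
--     for j in range(len(subsequence)):
--         for i in range(len(string)):
--             if subsequence[j] == string[i]:
--                 for k in range(-1, i):
--                     dpt[j, i] += dpt[j - 1, k]
--                     if dpt[j - 1, k] > 0:
--                         traceback[j, i].append((j - 1, k))
--
--     # Find all the end locations of the subsequences and trace back from each seed
--     paths = []
--     j = len(subsequence) - 1
--     for i in range(len(string)):
--         if dpt[j, i] > 0:
--             paths.extend(get_traceback(traceback, (j, i), limit=limit))
--
--     return paths
-- ===== SOURCE B (Python) =====
-- def _first(rows, j, i, t):
--     """First t embeddings (ordered by predecessor position, ascending) of the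
--     pattern prefix of length j + 1 ending at string position i."""
--     if t <= 0:
--         return []
--     if j == 0:
--         return [[i]]
--     out = []
--     for k in range(i):
--         if rows[j - 1][k] > 0:
--             out += [p + [i] for p in _first(rows, j - 1, k, t - len(out))]
--             if len(out) == t:
--                 break
--     return out
--
-- def subsequences(string, subsequence, limit=1):
--     n, m = len(string), len(subsequence)
--     if m == 0:
--         return []
--     # rows[j][i] = number of embeddings of subsequence[:j+1] ending at i,
--     # computed with prefix sums in O(m*n).
--     rows = []
--     pref = [1] * (n + 1)
--     for j in range(m):
--         row = []
--         for i in range(n):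
--             row.append(pref[i] if string[i] == subsequence[j] else 0)
--         rows.append(row)
--         pref = [0]
--         for c in row:
--             pref.append(pref[-1] + c)
--     out = []
--     for i in range(n):
--         if rows[m - 1][i] > 0:
--             if m == 1:
--                 if limit > 0:
--                     out.append([i])
--             else:
--                 preds = [k for k in range(i) if rows[m - 2][k] > 0]
--                 for k in preds[:limit]:
--                     out += [p + [i] for p in _first(rows, m - 2, k, limit)]
--     return out
-- ===== Notes on version B (the rewrite author's own statement) =====
-- stated objective: faster
-- what changed: Replaces A's O(m*n^2) defaultdict count/traceback table build plus un-memoized recursive path re-enumeration by an O(m*n) prefix-sum count table and a budgeted first-t enumerator that materializes only the paths actually returned; Pre_ excludes negative limit, where A's [:limit] slices accidentally mean 'drop the last |limit| items' rather than a path count.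
-- outside the precondition, e.g. on subsequences('abbababa', 'baa', -1): A returns [[1, 3, 7]], B returns []
import Mathlib
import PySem

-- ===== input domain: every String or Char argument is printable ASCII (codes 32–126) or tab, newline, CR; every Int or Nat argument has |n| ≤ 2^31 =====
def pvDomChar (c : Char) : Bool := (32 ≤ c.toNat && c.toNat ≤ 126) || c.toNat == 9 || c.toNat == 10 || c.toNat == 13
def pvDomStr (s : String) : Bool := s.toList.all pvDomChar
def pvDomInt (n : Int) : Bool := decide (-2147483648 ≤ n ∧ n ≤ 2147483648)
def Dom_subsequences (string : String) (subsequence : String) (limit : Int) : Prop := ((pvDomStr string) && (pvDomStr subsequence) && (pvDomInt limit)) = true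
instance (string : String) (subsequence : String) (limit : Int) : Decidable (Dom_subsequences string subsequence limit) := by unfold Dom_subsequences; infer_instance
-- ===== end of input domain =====

-- B replaces A's O(m·n²) dict-based count/traceback build and un-memoized recursive
-- path re-enumeration by an O(m·n) prefix-sum count table plus a budgeted enumerator
-- that materializes only the returned paths (objective: faster).


-- ===== PORT A =====
-- get_traceback; the fuel argument only makes the recursion total (A's recursion
-- depth from a seed (j, i) is j + 2; the caller passes enough fuel).
def getTraceback (tb : PySem.Dict (Int × Int) (List (Int × Int))) (seed : Int × Int)
    (limit : Option Int) : Nat → List (List Int)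
  | 0 => []
  | fuel + 1 =>
    let entry := tb.getD seed []
    if entry.length = 0 then [[]]
    else
      (PySem.List.slice entry none limit).foldl (fun newPaths newSeed =>
        let subPaths := getTraceback tb newSeed none fuel
        (PySem.List.slice subPaths none limit).foldl
          (fun acc p => acc ++ [p ++ [seed.2]]) newPaths) []

def subsequences (string : String) (subsequence : String) (limit : Int) : List (List Int) :=
  let s := string.toList
  let t := subsequence.toList
  let dpt0 : PySem.Dict (Int × Int) Int := PySem.Dict.empty.insert (-1, -1) 1
  let tb0 : PySem.Dict (Int × Int) (List (Int × Int)) := PySem.Dict.empty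
  let st :=
    (PySem.List.pyRange 0 (t.length : Int) 1).foldl (fun st j =>
      (PySem.List.pyRange 0 (s.length : Int) 1).foldl (fun st i =>
        if PySem.List.pyGet? t j == PySem.List.pyGet? s i then
          (PySem.List.pyRange (-1) i 1).foldl (fun st k =>
            let d1 := st.1.getD (j - 1, k) 0
            let dpt' := st.1.insert (j, i) (st.1.getD (j, i) 0 + d1)
            let tb' := if d1 > 0 then st.2.insert (j, i) (st.2.getD (j, i) [] ++ [(j - 1, k)]) else st.2
            (dpt', tb')) st
        else st) st) (dpt0, tb0)
  let jl : Int := (t.length : Int) - 1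
  (PySem.List.pyRange 0 (s.length : Int) 1).foldl (fun paths i =>
    if st.1.getD (jl, i) 0 > 0 then
      paths ++ getTraceback st.2 (jl, i) (some limit) (t.length + 1)
    else paths) []

-- ===== PORT B =====
-- _first from Source B (j is the Python j, always ≥ 0 at every call; structural on j).
def firstPaths (rows : List (List Int)) : Nat → Int → Int → List (List Int)
  | 0, i, t => if t ≤ 0 then [] else [[i]]
  | j' + 1, i, t =>
    if t ≤ 0 then []
    else
      ((PySem.List.pyRange 0 i 1).foldl (fun st k =>
        if st.2 then st
        else if PySem.List.pyGetD (PySem.List.pyGetD rows (j' : Int) []) k 0 > 0 then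
          let out := st.1 ++ (firstPaths rows j' k (t - (st.1.length : Int))).map (· ++ [i])
          (out, decide ((out.length : Int) = t))
        else st) (([] : List (List Int)), false)).1

def subsequences_alt (string : String) (subsequence : String) (limit : Int) : List (List Int) :=
  let s := string.toList
  let t := subsequence.toList
  let n : Int := (s.length : Int)
  let m : Nat := t.length
  if m = 0 then []
  else
    let rows := ((PySem.List.pyRange 0 (m : Int) 1).foldl (fun st j =>
        let row := (PySem.List.pyRange 0 n 1).foldl (fun row i =>
            row ++ [if PySem.List.pyGet? s i == PySem.List.pyGet? t j then PySem.List.pyGetD st.2 i 0 else 0]) []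
        let rows := st.1 ++ [row]
        let pref := row.foldl (fun pref c => pref ++ [PySem.List.pyGetD pref (-1) 0 + c]) [(0 : Int)]
        (rows, pref)) (([] : List (List Int)), List.replicate (s.length + 1) (1 : Int))).1
    (PySem.List.pyRange 0 n 1).foldl (fun out i =>
      if PySem.List.pyGetD (PySem.List.pyGetD rows ((m : Int) - 1) []) i 0 > 0 then
        if m = 1 then
          if 0 < limit then out ++ [[i]] else out
        else
          let preds := (PySem.List.pyRange 0 i 1).foldl (fun acc k =>
            if PySem.List.pyGetD (PySem.List.pyGetD rows ((m : Int) - 2) []) k 0 > 0 then acc ++ [k] else acc) []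
          (PySem.List.slice preds none (some limit)).foldl (fun out k =>
            out ++ (firstPaths rows (m - 2) k limit).map (· ++ [i])) out
      else out) []

-- ===== PRECONDITION & SPEC =====
-- Pre_ restricts limit to the natural domain limit ≥ 0 (a count of paths): for a
-- negative limit A's [:limit] slices accidentally mean 'drop the last |limit| items'.
def Pre_subsequences (string : String) (subsequence : String) (limit : Int) : Prop := 0 ≤ limit
instance (string : String) (subsequence : String) (limit : Int) : Decidable (Pre_subsequences string subsequence limit) := by unfold Pre_subsequences; infer_instance
def pvWitness_subsequences : String × String × Int := ("abab", "ab", 1)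

def Spec_subsequences (string : String) (subsequence : String) (limit : Int) (out : List (List Int)) : Prop := out = subsequences_alt string subsequence limit
instance (string : String) (subsequence : String) (limit : Int) (out : List (List Int)) : Decidable (Spec_subsequences string subsequence limit out) := by unfold Spec_subsequences; infer_instance

-- ===== CLAIM (what is proved, stated in full; the proofs are below) =====
def Claim_equal_subsequences : Prop := ∀ (string : String) (subsequence : String) (limit : Int), Dom_subsequences string subsequence limit → Pre_subsequences string subsequence limit → Spec_subsequences string subsequence limit (subsequences string subsequence limit)

-- ===== LEMMAS AND PROOFS =====

-- The match test A and B perform (A writes subsequence[j] == string[i]).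
def pvMt (s t : List Char) (j i : Nat) : Bool :=
  PySem.List.pyGet? t (j : Int) == PySem.List.pyGet? s (i : Int)

-- Reference: all embeddings of t[0..j] ending at position i, in the order both
-- programs enumerate them (by the previous position, ascending, recursively).
def pvEmb (s t : List Char) : Nat → Nat → List (List Int)
  | 0, i => if pvMt s t 0 i then [[(i : Int)]] else []
  | j + 1, i =>
    if pvMt s t (j + 1) i then
      (List.range i).flatMap (fun k => (pvEmb s t j k).map (· ++ [(i : Int)]))
    else []

def pvCnt (s t : List Char) (j i : Nat) : Int := ((pvEmb s t j i).length : Int)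

-- Value of A's dpt dictionary after the table build.
def pvDval (s t : List Char) (key : Int × Int) : Int :=
  if key = (-1, -1) then 1
  else if 0 ≤ key.1 ∧ key.1 < (t.length : Int) ∧ 0 ≤ key.2 ∧ key.2 < (s.length : Int) then
    pvCnt s t key.1.toNat key.2.toNat
  else 0

-- Value of A's traceback dictionary after the table build.
def pvTval (s t : List Char) (key : Int × Int) : List (Int × Int) :=
  if 0 ≤ key.1 ∧ key.1 < (t.length : Int) ∧ 0 ≤ key.2 ∧ key.2 < (s.length : Int)
      ∧ pvMt s t key.1.toNat key.2.toNat then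
    ((PySem.List.pyRange (-1) key.2 1).filter (fun k => 0 < pvDval s t (key.1 - 1, k))).map
      (fun k => (key.1 - 1, k))
  else []

-- Mid-build values: rows below J done, row J done strictly left of I.
def pvDvalP (s t : List Char) (J I : Int) (key : Int × Int) : Int :=
  if key.1 < J ∨ (key.1 = J ∧ key.2 < I) then pvDval s t key
  else if key = (-1, -1) then 1 else 0

def pvTvalP (s t : List Char) (J I : Int) (key : Int × Int) : List (Int × Int) :=
  if key.1 < J ∨ (key.1 = J ∧ key.2 < I) then pvTval s t key else []

theorem pvMt_of_emb_ne (s t : List Char) (j i : Nat) (h : pvEmb s t j i ≠ []) :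
    pvMt s t j i = true := by
  cases j with
  | zero => by_cases hm : pvMt s t 0 i <;> simp [pvEmb, hm] at h ⊢
  | succ j' => by_cases hm : pvMt s t (j' + 1) i <;> simp [pvEmb, hm] at h ⊢

theorem pvDval_cast (s t : List Char) (j i : Nat) (hj : j < t.length) (hi : i < s.length) :
    pvDval s t ((j : Int), (i : Int)) = pvCnt s t j i := by
  simp [pvDval]
  intro h
  omega

theorem pvDval_neg_left (s t : List Char) (k : Int) (hk : k ≠ -1) :
    pvDval s t (-1, k) = 0 := by
  simp [pvDval, hk]

theorem pvDval_snd_neg_one (s t : List Char) (j : Int) (hj : 0 ≤ j) :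
    pvDval s t (j, -1) = 0 := by
  simp [pvDval]
  intro h
  omega

theorem flatMap_filter_of_nil {α β : Type} (l : List α) (p : α → Bool) (f : α → List β)
    (h : ∀ x ∈ l, p x = false → f x = []) : (l.filter p).flatMap f = l.flatMap f := by
  induction l with
  | nil => rfl
  | cons x xs ih =>
    by_cases hp : p x
    · simp only [List.filter_cons, hp, if_true, List.flatMap_cons]
      rw [ih (fun y hy hpy => h y (by simp [hy]) hpy)]
    · simp only [List.filter_cons, hp]
      simp only [Bool.false_eq_true, if_false, List.flatMap_cons,
        h x (by simp) (by simpa using hp)]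
      rw [ih (fun y hy hpy => h y (by simp [hy]) hpy)]
      simp

-- The count identity: for a matched cell the count is the sum over k ∈ [-1, i)
-- of the previous row's dictionary values (exactly what A's k-loop accumulates).
theorem pvCnt_eq_sum (s t : List Char) (j i : Nat) (hj : j < t.length) (hi : i < s.length)
    (hm : pvMt s t j i = true) :
    pvCnt s t j i
      = ((PySem.List.pyRange (-1) (i : Int) 1).map (fun k => pvDval s t ((j : Int) - 1, k))).sum := by
  have hsplit : PySem.List.pyRange (-1) (i : Int) 1 = -1 :: PySem.List.pyRange 0 (i : Int) 1 := by
    have := PySem.List.pyRange_one_cons (a := -1) (b := (i : Int)) (by omega)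
    simpa using this
  rw [hsplit]
  simp only [List.map_cons, List.sum_cons]
  have hrange : PySem.List.pyRange 0 (i : Int) 1 = (List.range i).map (fun k : Nat => (k : Int)) := by
    rw [PySem.List.pyRange_one]
    norm_num
  cases j with
  | zero =>
    have h1 : pvDval s t (((0 : Nat) : Int) - 1, -1) = 1 := by norm_num [pvDval]
    have h2 : ((PySem.List.pyRange 0 (i : Int) 1).map
        (fun k => pvDval s t (((0 : Nat) : Int) - 1, k))).sum = 0 := by
      apply List.sum_eq_zero
      intro x hx
      simp only [List.mem_map] at hx
      obtain ⟨k, hk, rfl⟩ := hx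
      rw [PySem.List.mem_pyRange_one] at hk
      have : ((0 : Nat) : Int) - 1 = -1 := by norm_num
      rw [this]
      apply pvDval_neg_left
      omega
    rw [h1, h2]
    simp [pvCnt, pvEmb, hm]
  | succ j' =>
    have h1 : pvDval s t (((j' + 1 : Nat) : Int) - 1, -1) = 0 := by
      apply pvDval_snd_neg_one; push_cast; omega
    rw [h1, zero_add, hrange, List.map_map]
    have h3 : ∀ k ∈ List.range i,
        ((fun k => pvDval s t (((j' + 1 : Nat) : Int) - 1, k)) ∘ fun k : Nat => (k : Int)) k
          = pvCnt s t j' k := by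
      intro k hk
      simp only [List.mem_range] at hk
      have he : ((j' + 1 : Nat) : Int) - 1 = (j' : Int) := by push_cast; omega
      simp only [Function.comp_apply, he]
      exact pvDval_cast s t j' k (by omega) (by omega)
    rw [List.map_congr_left h3]
    simp only [pvCnt, pvEmb, hm, if_true]
    rw [List.length_flatMap]
    push_cast
    rw [List.map_map]
    congr 1
    apply List.map_congr_left
    intro k hk
    simp [pvCnt]

theorem pvDvalP_succ_ne (s t : List Char) (J I : Int) (key : Int × Int) (hne : key ≠ (J, I)) :
    pvDvalP s t J (I + 1) key = pvDvalP s t J I key := by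
  unfold pvDvalP
  by_cases h1 : key.1 < J ∨ (key.1 = J ∧ key.2 < I)
  · rw [if_pos h1, if_pos (by rcases h1 with h | ⟨h, h'⟩; exact Or.inl h; exact Or.inr ⟨h, by omega⟩)]
  · rw [if_neg h1, if_neg ?_]
    intro h2
    rcases h2 with h | ⟨h2a, h2b⟩
    · exact h1 (Or.inl h)
    · have : key.2 = I := by
        by_contra hne2
        exact h1 (Or.inr ⟨h2a, by omega⟩)
      exact hne (by rw [Prod.ext_iff]; exact ⟨h2a, this⟩)

theorem pvTvalP_succ_ne (s t : List Char) (J I : Int) (key : Int × Int) (hne : key ≠ (J, I)) :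
    pvTvalP s t J (I + 1) key = pvTvalP s t J I key := by
  unfold pvTvalP
  by_cases h1 : key.1 < J ∨ (key.1 = J ∧ key.2 < I)
  · rw [if_pos h1, if_pos (by rcases h1 with h | ⟨h, h'⟩; exact Or.inl h; exact Or.inr ⟨h, by omega⟩)]
  · rw [if_neg h1, if_neg ?_]
    intro h2
    rcases h2 with h | ⟨h2a, h2b⟩
    · exact h1 (Or.inl h)
    · have : key.2 = I := by
        by_contra hne2
        exact h1 (Or.inr ⟨h2a, by omega⟩)
      exact hne (by rw [Prod.ext_iff]; exact ⟨h2a, this⟩)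

theorem pvDvalP_self (s t : List Char) (J I : Int) :
    pvDvalP s t J (I + 1) (J, I) = pvDval s t (J, I) := by
  unfold pvDvalP
  rw [if_pos (Or.inr ⟨rfl, by omega⟩)]

theorem pvTvalP_self (s t : List Char) (J I : Int) :
    pvTvalP s t J (I + 1) (J, I) = pvTval s t (J, I) := by
  unfold pvTvalP
  rw [if_pos (Or.inr ⟨rfl, by omega⟩)]

theorem pvDvalP_at_self (s t : List Char) (J I : Int) (hJ : 0 ≤ J) :
    pvDvalP s t J I (J, I) = 0 := by
  unfold pvDvalP
  rw [if_neg (by omega), if_neg (by intro h; rw [Prod.ext_iff] at h; omega)]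

theorem pvTvalP_at_self (s t : List Char) (J I : Int) :
    pvTvalP s t J I (J, I) = [] := by
  unfold pvTvalP
  rw [if_neg (by omega)]

-- The k-loop of A's table build, for one matched cell (j, i).
theorem pvKfold (s t : List Char) (j i : Nat)
    (st0 : PySem.Dict (Int × Int) Int × PySem.Dict (Int × Int) (List (Int × Int)))
    (hD : ∀ key, st0.1.getD key 0 = pvDvalP s t (j : Int) (i : Int) key)
    (hT : ∀ key, st0.2.getD key [] = pvTvalP s t (j : Int) (i : Int) key)
    (P : Int) (hP0 : -1 ≤ P) (hPi : P ≤ (i : Int)) :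
    (∀ key, ((PySem.List.pyRange (-1) P 1).foldl (fun st k =>
        let d1 := st.1.getD ((j : Int) - 1, k) 0
        let dpt' := st.1.insert ((j : Int), (i : Int)) (st.1.getD ((j : Int), (i : Int)) 0 + d1)
        let tb' := if d1 > 0 then st.2.insert ((j : Int), (i : Int)) (st.2.getD ((j : Int), (i : Int)) [] ++ [((j : Int) - 1, k)]) else st.2
        (dpt', tb')) st0).1.getD key 0
      = if key = ((j : Int), (i : Int))
        then ((PySem.List.pyRange (-1) P 1).map (fun k => pvDval s t ((j : Int) - 1, k))).sum
        else pvDvalP s t (j : Int) (i : Int) key)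
    ∧ (∀ key, ((PySem.List.pyRange (-1) P 1).foldl (fun st k =>
        let d1 := st.1.getD ((j : Int) - 1, k) 0
        let dpt' := st.1.insert ((j : Int), (i : Int)) (st.1.getD ((j : Int), (i : Int)) 0 + d1)
        let tb' := if d1 > 0 then st.2.insert ((j : Int), (i : Int)) (st.2.getD ((j : Int), (i : Int)) [] ++ [((j : Int) - 1, k)]) else st.2
        (dpt', tb')) st0).2.getD key []
      = if key = ((j : Int), (i : Int))
        then ((PySem.List.pyRange (-1) P 1).filter (fun k => 0 < pvDval s t ((j : Int) - 1, k))).map (fun k => ((j : Int) - 1, k))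
        else pvTvalP s t (j : Int) (i : Int) key) := by
  induction P, hP0 using Int.le_induction with
  | base =>
    rw [PySem.List.pyRange_one_eq_nil (by omega)]
    simp only [List.foldl_nil, List.map_nil, List.sum_nil, List.filter_nil]
    constructor
    · intro key
      rw [hD key]
      by_cases hk : key = ((j : Int), (i : Int))
      · rw [if_pos hk, hk, pvDvalP_at_self s t _ _ (by omega)]
      · rw [if_neg hk]
    · intro key
      rw [hT key]
      by_cases hk : key = ((j : Int), (i : Int))
      · rw [if_pos hk, hk, pvTvalP_at_self]
      · rw [if_neg hk]
  | succ P hP ih =>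
    obtain ⟨ihD, ihT⟩ := ih (by omega)
    rw [PySem.List.pyRange_one_succ_right (by omega)]
    simp only [List.foldl_append, List.foldl_cons, List.foldl_nil, List.map_append,
      List.sum_append, List.filter_append, List.map_cons, List.map_nil, List.sum_cons,
      List.sum_nil, add_zero]
    have hne : ((j : Int) - 1, P) ≠ ((j : Int), (i : Int)) := by
      intro h; rw [Prod.ext_iff] at h; omega
    have hd1 : (((PySem.List.pyRange (-1) P 1).foldl (fun st k =>
        let d1 := st.1.getD ((j : Int) - 1, k) 0
        let dpt' := st.1.insert ((j : Int), (i : Int)) (st.1.getD ((j : Int), (i : Int)) 0 + d1)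
        let tb' := if d1 > 0 then st.2.insert ((j : Int), (i : Int)) (st.2.getD ((j : Int), (i : Int)) [] ++ [((j : Int) - 1, k)]) else st.2
        (dpt', tb')) st0).1.getD ((j : Int) - 1, P) 0) = pvDval s t ((j : Int) - 1, P) := by
      rw [ihD _, if_neg hne]
      unfold pvDvalP
      rw [if_pos (Or.inl (by norm_num))]
    constructor
    · intro key
      rw [hd1, PySem.Dict.getD_insert]
      by_cases hk : key = ((j : Int), (i : Int))
      · rw [if_pos hk, if_pos hk, ihD _, if_pos rfl]
      · rw [if_neg hk, if_neg hk, ihD _, if_neg hk]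
    · intro key
      rw [hd1]
      by_cases hpos : pvDval s t ((j : Int) - 1, P) > 0
      · rw [if_pos hpos, PySem.Dict.getD_insert]
        by_cases hk : key = ((j : Int), (i : Int))
        · rw [if_pos hk, if_pos hk, ihT _, if_pos rfl]
          congr 1
          simp [hpos]
        · rw [if_neg hk, if_neg hk, ihT _, if_neg hk]
      · rw [if_neg hpos]
        by_cases hk : key = ((j : Int), (i : Int))
        · rw [ihT _, if_pos hk, if_pos hk]
          simp [hpos]
        · rw [ihT _, if_neg hk, if_neg hk]

theorem pvEmb_nil_of_not_match (s t : List Char) (j i : Nat) (h : pvMt s t j i = false) :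
    pvEmb s t j i = [] := by
  cases j <;> simp [pvEmb, h]

theorem pvTval_out_of_not_match (s t : List Char) (J I : Int) (hJ : 0 ≤ J)
    (hI : 0 ≤ I) (h : pvMt s t J.toNat I.toNat = false) : pvTval s t (J, I) = [] := by
  unfold pvTval
  rw [if_neg]
  intro ⟨_, _, _, _, hm⟩
  simp [h] at hm

theorem pvTval_out (s t : List Char) (key : Int × Int)
    (h : ¬ (0 ≤ key.1 ∧ key.1 < (t.length : Int) ∧ 0 ≤ key.2 ∧ key.2 < (s.length : Int))) :
    pvTval s t key = [] := by
  unfold pvTval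
  rw [if_neg]
  intro ⟨h1, h2, h3, h4, _⟩
  exact h ⟨h1, h2, h3, h4⟩

-- One full row of the table build (A's loop over i for a fixed j).
theorem pvIfold (s t : List Char) (j : Nat) (hj : j < t.length)
    (st0 : PySem.Dict (Int × Int) Int × PySem.Dict (Int × Int) (List (Int × Int)))
    (hD : ∀ key, st0.1.getD key 0 = pvDvalP s t (j : Int) 0 key)
    (hT : ∀ key, st0.2.getD key [] = pvTvalP s t (j : Int) 0 key)
    (I : Int) (hI0 : 0 ≤ I) (hIn : I ≤ (s.length : Int)) :
    (∀ key, ((PySem.List.pyRange 0 I 1).foldl (fun st i =>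
        if PySem.List.pyGet? t (j : Int) == PySem.List.pyGet? s i then
          (PySem.List.pyRange (-1) i 1).foldl (fun st k =>
            let d1 := st.1.getD ((j : Int) - 1, k) 0
            let dpt' := st.1.insert ((j : Int), i) (st.1.getD ((j : Int), i) 0 + d1)
            let tb' := if d1 > 0 then st.2.insert ((j : Int), i) (st.2.getD ((j : Int), i) [] ++ [((j : Int) - 1, k)]) else st.2
            (dpt', tb')) st
        else st) st0).1.getD key 0 = pvDvalP s t (j : Int) I key)
    ∧ (∀ key, ((PySem.List.pyRange 0 I 1).foldl (fun st i =>
        if PySem.List.pyGet? t (j : Int) == PySem.List.pyGet? s i then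
          (PySem.List.pyRange (-1) i 1).foldl (fun st k =>
            let d1 := st.1.getD ((j : Int) - 1, k) 0
            let dpt' := st.1.insert ((j : Int), i) (st.1.getD ((j : Int), i) 0 + d1)
            let tb' := if d1 > 0 then st.2.insert ((j : Int), i) (st.2.getD ((j : Int), i) [] ++ [((j : Int) - 1, k)]) else st.2
            (dpt', tb')) st
        else st) st0).2.getD key [] = pvTvalP s t (j : Int) I key) := by
  induction I, hI0 using Int.le_induction with
  | base =>
    rw [PySem.List.pyRange_one_eq_nil (by omega)]
    exact ⟨hD, hT⟩
  | succ I hI ih =>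
    obtain ⟨ihD, ihT⟩ := ih (by omega)
    rw [PySem.List.pyRange_one_succ_right (by omega)]
    simp only [List.foldl_append, List.foldl_cons, List.foldl_nil]
    set stI := (PySem.List.pyRange 0 I 1).foldl (fun st i =>
        if PySem.List.pyGet? t (j : Int) == PySem.List.pyGet? s i then
          (PySem.List.pyRange (-1) i 1).foldl (fun st k =>
            let d1 := st.1.getD ((j : Int) - 1, k) 0
            let dpt' := st.1.insert ((j : Int), i) (st.1.getD ((j : Int), i) 0 + d1)
            let tb' := if d1 > 0 then st.2.insert ((j : Int), i) (st.2.getD ((j : Int), i) [] ++ [((j : Int) - 1, k)]) else st.2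
            (dpt', tb')) st
        else st) st0 with hstI
    obtain ⟨iN, rfl⟩ : ∃ iN : Nat, I = (iN : Int) := ⟨I.toNat, by omega⟩
    have hiN : iN < s.length := by omega
    by_cases hm : pvMt s t j iN
    · rw [if_pos (by exact hm)]
      have hK := pvKfold s t j iN stI ihD ihT (iN : Int) (by omega) (le_refl _)
      have hsum : ((PySem.List.pyRange (-1) (iN : Int) 1).map
          (fun k => pvDval s t ((j : Int) - 1, k))).sum = pvDval s t ((j : Int), (iN : Int)) := by
        rw [pvDval_cast s t j iN hj hiN]
        exact (pvCnt_eq_sum s t j iN hj hiN hm).symm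
      have htv : ((PySem.List.pyRange (-1) (iN : Int) 1).filter
            (fun k => 0 < pvDval s t ((j : Int) - 1, k))).map (fun k => ((j : Int) - 1, k))
          = pvTval s t ((j : Int), (iN : Int)) := by
        unfold pvTval
        rw [if_pos ⟨Int.natCast_nonneg j, by simpa using hj, Int.natCast_nonneg iN,
          by simpa using hiN, by simpa using hm⟩]
      constructor
      · intro key
        rw [(hK.1 key : _)]
        by_cases hk : key = ((j : Int), (iN : Int))
        · rw [if_pos hk, hsum, hk, pvDvalP_self]
        · rw [if_neg hk, pvDvalP_succ_ne s t _ _ _ hk]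
      · intro key
        rw [(hK.2 key : _)]
        by_cases hk : key = ((j : Int), (iN : Int))
        · rw [if_pos hk, htv, hk, pvTvalP_self]
        · rw [if_neg hk, pvTvalP_succ_ne s t _ _ _ hk]
    · rw [if_neg (by exact hm)]
      have hz : pvDval s t ((j : Int), (iN : Int)) = 0 := by
        rw [pvDval_cast s t j iN hj hiN]
        simp [pvCnt, pvEmb_nil_of_not_match s t j iN (by simpa using hm)]
      have htz : pvTval s t ((j : Int), (iN : Int)) = [] := by
        apply pvTval_out_of_not_match s t _ _ (by omega) (by omega)
        simpa using hm
      constructor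
      · intro key
        rw [ihD key]
        by_cases hk : key = ((j : Int), (iN : Int))
        · rw [hk, pvDvalP_at_self s t _ _ (by omega), pvDvalP_self, hz]
        · rw [pvDvalP_succ_ne s t _ _ _ hk]
      · intro key
        rw [ihT key]
        by_cases hk : key = ((j : Int), (iN : Int))
        · rw [hk, pvTvalP_at_self, pvTvalP_self, htz]
        · rw [pvTvalP_succ_ne s t _ _ _ hk]

theorem pvDvalP_row_end (s t : List Char) (J : Int) (hJ : 0 ≤ J) (key : Int × Int) :
    pvDvalP s t J (s.length : Int) key = pvDvalP s t (J + 1) 0 key := by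
  obtain ⟨a, b⟩ := key
  unfold pvDvalP pvDval
  simp only [Prod.mk.injEq]
  split_ifs <;> first | rfl | omega

theorem pvTvalP_row_end (s t : List Char) (J : Int) (hJ : 0 ≤ J) (key : Int × Int) :
    pvTvalP s t J (s.length : Int) key = pvTvalP s t (J + 1) 0 key := by
  obtain ⟨a, b⟩ := key
  unfold pvTvalP pvTval
  split_ifs with h1 h2 h3 h4 h5 h6 <;> first | rfl | omega | (exfalso; omega) | skip
  all_goals try (exfalso; omega)
  all_goals tauto

theorem pvDvalP_final (s t : List Char) (key : Int × Int) :
    pvDvalP s t (t.length : Int) 0 key = pvDval s t key := by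
  obtain ⟨a, b⟩ := key
  unfold pvDvalP pvDval
  simp only [Prod.mk.injEq]
  split_ifs <;> first | rfl | omega

theorem pvTvalP_final (s t : List Char) (key : Int × Int) :
    pvTvalP s t (t.length : Int) 0 key = pvTval s t key := by
  obtain ⟨a, b⟩ := key
  unfold pvTvalP pvTval
  split_ifs <;> first | rfl | omega | skip
  all_goals try (exfalso; omega)
  all_goals tauto

-- The whole table build of A.
theorem pvBuild (s t : List Char) :
    (∀ key, ((PySem.List.pyRange 0 (t.length : Int) 1).foldl (fun st j =>
      (PySem.List.pyRange 0 (s.length : Int) 1).foldl (fun st i =>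
        if PySem.List.pyGet? t j == PySem.List.pyGet? s i then
          (PySem.List.pyRange (-1) i 1).foldl (fun st k =>
            let d1 := st.1.getD (j - 1, k) 0
            let dpt' := st.1.insert (j, i) (st.1.getD (j, i) 0 + d1)
            let tb' := if d1 > 0 then st.2.insert (j, i) (st.2.getD (j, i) [] ++ [(j - 1, k)]) else st.2
            (dpt', tb')) st
        else st) st)
      ((PySem.Dict.empty.insert (-1, -1) 1 : PySem.Dict (Int × Int) Int), (PySem.Dict.empty : PySem.Dict (Int × Int) (List (Int × Int))))).1.getD key 0
      = pvDval s t key)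
    ∧ (∀ key, ((PySem.List.pyRange 0 (t.length : Int) 1).foldl (fun st j =>
      (PySem.List.pyRange 0 (s.length : Int) 1).foldl (fun st i =>
        if PySem.List.pyGet? t j == PySem.List.pyGet? s i then
          (PySem.List.pyRange (-1) i 1).foldl (fun st k =>
            let d1 := st.1.getD (j - 1, k) 0
            let dpt' := st.1.insert (j, i) (st.1.getD (j, i) 0 + d1)
            let tb' := if d1 > 0 then st.2.insert (j, i) (st.2.getD (j, i) [] ++ [(j - 1, k)]) else st.2
            (dpt', tb')) st
        else st) st)
      ((PySem.Dict.empty.insert (-1, -1) 1 : PySem.Dict (Int × Int) Int), (PySem.Dict.empty : PySem.Dict (Int × Int) (List (Int × Int))))).2.getD key []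
      = pvTval s t key) := by
  have main : ∀ (J : Int), 0 ≤ J → J ≤ (t.length : Int) →
      (∀ key, ((PySem.List.pyRange 0 J 1).foldl (fun st j =>
        (PySem.List.pyRange 0 (s.length : Int) 1).foldl (fun st i =>
          if PySem.List.pyGet? t j == PySem.List.pyGet? s i then
            (PySem.List.pyRange (-1) i 1).foldl (fun st k =>
              let d1 := st.1.getD (j - 1, k) 0
              let dpt' := st.1.insert (j, i) (st.1.getD (j, i) 0 + d1)
              let tb' := if d1 > 0 then st.2.insert (j, i) (st.2.getD (j, i) [] ++ [(j - 1, k)]) else st.2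
              (dpt', tb')) st
          else st) st)
        ((PySem.Dict.empty.insert (-1, -1) 1 : PySem.Dict (Int × Int) Int), (PySem.Dict.empty : PySem.Dict (Int × Int) (List (Int × Int))))).1.getD key 0
        = pvDvalP s t J 0 key)
      ∧ (∀ key, ((PySem.List.pyRange 0 J 1).foldl (fun st j =>
        (PySem.List.pyRange 0 (s.length : Int) 1).foldl (fun st i =>
          if PySem.List.pyGet? t j == PySem.List.pyGet? s i then
            (PySem.List.pyRange (-1) i 1).foldl (fun st k =>
              let d1 := st.1.getD (j - 1, k) 0
              let dpt' := st.1.insert (j, i) (st.1.getD (j, i) 0 + d1)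
              let tb' := if d1 > 0 then st.2.insert (j, i) (st.2.getD (j, i) [] ++ [(j - 1, k)]) else st.2
              (dpt', tb')) st
          else st) st)
        ((PySem.Dict.empty.insert (-1, -1) 1 : PySem.Dict (Int × Int) Int), (PySem.Dict.empty : PySem.Dict (Int × Int) (List (Int × Int))))).2.getD key []
        = pvTvalP s t J 0 key) := by
    intro J hJ0
    induction J, hJ0 using Int.le_induction with
    | base =>
      intro _
      rw [PySem.List.pyRange_one_eq_nil (a := 0) (b := 0) (by omega)]
      constructor
      · intro key
        obtain ⟨a, b⟩ := key
        simp only [List.foldl_nil]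
        rw [PySem.Dict.getD_insert, PySem.Dict.getD_empty]
        unfold pvDvalP pvDval
        simp only [Prod.mk.injEq]
        split_ifs <;> first | rfl | omega
      · intro key
        obtain ⟨a, b⟩ := key
        simp only [List.foldl_nil]
        rw [PySem.Dict.getD_empty]
        unfold pvTvalP pvTval
        split_ifs <;> first | rfl | omega | skip
        all_goals try (exfalso; omega)
        all_goals tauto
    | succ J hJ ih =>
      intro hJ1
      obtain ⟨ihD, ihT⟩ := ih (by omega)
      rw [PySem.List.pyRange_one_succ_right (by omega)]
      simp only [List.foldl_append, List.foldl_cons, List.foldl_nil]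
      obtain ⟨jN, rfl⟩ : ∃ jN : Nat, J = (jN : Int) := ⟨J.toNat, by omega⟩
      have hjN : jN < t.length := by omega
      have hI := pvIfold s t jN hjN _ ihD ihT
        (s.length : Int) (by omega) (le_refl _)
      constructor
      · intro key
        rw [(hI.1 key : _), pvDvalP_row_end s t _ (by omega)]
      · intro key
        rw [(hI.2 key : _), pvTvalP_row_end s t _ (by omega)]
  have h := main (t.length : Int) (by omega) (le_refl _)
  exact ⟨fun key => by rw [h.1 key, pvDvalP_final], fun key => by rw [h.2 key, pvTvalP_final]⟩

theorem flatMap_congr_mem {α β : Type} (l : List α) (f g : α → List β)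
    (h : ∀ x ∈ l, f x = g x) : l.flatMap f = l.flatMap g := by
  induction l with
  | nil => rfl
  | cons x xs ih =>
    simp only [List.flatMap_cons, h x (by simp)]
    rw [ih (fun y hy => h y (by simp [hy]))]

theorem pvTval_cast (s t : List Char) (j i : Nat) (hj : j < t.length) (hi : i < s.length)
    (hm : pvMt s t j i = true) :
    pvTval s t ((j : Int), (i : Int))
      = ((PySem.List.pyRange (-1) (i : Int) 1).filter
          (fun k => 0 < pvDval s t ((j : Int) - 1, k))).map (fun k => ((j : Int) - 1, k)) := by
  unfold pvTval
  rw [if_pos ⟨Int.natCast_nonneg j, by simpa using hj, Int.natCast_nonneg i,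
    by simpa using hi, by simpa using hm⟩]

theorem pvTval_zero (s t : List Char) (i : Nat) (hj : 0 < t.length) (hi : i < s.length)
    (hm : pvMt s t 0 i = true) :
    pvTval s t (((0 : Nat) : Int), (i : Int)) = [(-1, -1)] := by
  rw [pvTval_cast s t 0 i hj hi hm]
  have hsplit : PySem.List.pyRange (-1) (i : Int) 1 = -1 :: PySem.List.pyRange 0 (i : Int) 1 := by
    have := PySem.List.pyRange_one_cons (a := -1) (b := (i : Int)) (by omega)
    simpa using this
  have hfil : (PySem.List.pyRange 0 (i : Int) 1).filter
      (fun k => 0 < pvDval s t (((0 : Nat) : Int) - 1, k)) = [] := by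
    rw [List.filter_eq_nil_iff]
    intro k hk
    rw [PySem.List.mem_pyRange_one] at hk
    have h0 : ((0 : Nat) : Int) - 1 = -1 := by norm_num
    rw [h0, pvDval_neg_left s t k (by omega)]
    norm_num
  rw [hsplit, List.filter_cons, if_pos (by norm_num [pvDval]), hfil]
  norm_num

theorem pvCnt_pos_iff (s t : List Char) (j i : Nat) : 0 < pvCnt s t j i ↔ pvEmb s t j i ≠ [] := by
  unfold pvCnt
  constructor
  · intro h hnil
    rw [hnil] at h
    simp at h
  · intro h
    have := List.length_pos_of_ne_nil h
    omega

-- getTraceback with limit None computes pvEmb (with enough fuel).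
theorem pvGtb (s t : List Char) (T : PySem.Dict (Int × Int) (List (Int × Int)))
    (hT : ∀ key, T.getD key [] = pvTval s t key) (j : Nat) :
    ∀ (fuel : Nat) (i : Nat), j < t.length → i < s.length → j + 2 ≤ fuel →
    pvEmb s t j i ≠ [] →
    getTraceback T ((j : Int), (i : Int)) none fuel = pvEmb s t j i := by
  induction j with
  | zero =>
    intro fuel i hj hi hfuel hne
    have hm : pvMt s t 0 i = true := pvMt_of_emb_ne s t 0 i hne
    match fuel, hfuel with
    | f + 2, _ =>
      show getTraceback T (((0 : Nat) : Int), (i : Int)) none (f + 2) = _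
      rw [getTraceback]
      simp only [hT _, pvTval_zero s t i hj hi hm]
      rw [if_neg (by norm_num)]
      rw [PySem.List.slice_none_none]
      simp only [List.foldl_cons, List.foldl_nil]
      rw [getTraceback]
      have hempty : T.getD (-1, -1) [] = [] := by
        rw [hT _, pvTval_out s t _ (by norm_num)]
      rw [hempty]
      simp only [List.length_nil, if_pos rfl, PySem.List.slice_none_none]
      simp only [List.foldl_cons, List.foldl_nil, List.nil_append]
      simp [pvEmb, hm]
  | succ j' ih =>
    intro fuel i hj hi hfuel hne
    have hm : pvMt s t (j' + 1) i = true := pvMt_of_emb_ne s t (j' + 1) i hne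
    match fuel, hfuel with
    | f + 1, hfuel =>
      have hf : j' + 2 ≤ f := by omega
      rw [getTraceback]
      have hcast : ((j' + 1 : Nat) : Int) - 1 = (j' : Int) := by push_cast; omega
      have hrange : PySem.List.pyRange (-1) (i : Int) 1 = -1 :: PySem.List.pyRange 0 (i : Int) 1 := by
        have := PySem.List.pyRange_one_cons (a := -1) (b := (i : Int)) (by omega)
        simpa using this
      have hrange2 : PySem.List.pyRange 0 (i : Int) 1 = (List.range i).map (fun k : Nat => (k : Int)) := by
        rw [PySem.List.pyRange_one]
        norm_num
      have hentry : T.getD (((j' + 1 : Nat) : Int), (i : Int)) []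
          = ((List.range i).filter (fun kN : Nat => 0 < pvCnt s t j' kN)).map
              (fun kN : Nat => ((j' : Int), (kN : Int))) := by
        rw [hT _, pvTval_cast s t (j' + 1) i hj hi hm, hcast, hrange]
        rw [List.filter_cons, if_neg (by simp [pvDval_snd_neg_one s t _ (Int.natCast_nonneg j')])]
        rw [hrange2, List.filter_map, List.map_map]
        congr 1
        apply List.filter_congr
        intro kN hkN
        simp only [List.mem_range] at hkN
        simp only [Function.comp_apply]
        rw [pvDval_cast s t j' kN (by omega) (by omega)]
      have hne2 : ((List.range i).filter (fun kN : Nat => 0 < pvCnt s t j' kN)) ≠ [] := by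
        intro hnil
        apply hne
        simp only [pvEmb, hm, if_true]
        apply List.flatMap_eq_nil_iff.mpr
        intro kN hkN
        have : ¬ (0 < pvCnt s t j' kN) := by
          intro hpos
          have : kN ∈ ((List.range i).filter (fun kN : Nat => 0 < pvCnt s t j' kN)) := by
            rw [List.mem_filter]
            exact ⟨hkN, by simpa using hpos⟩
          rw [hnil] at this
          simp at this
        have hz : pvEmb s t j' kN = [] := by
          by_contra hnn
          exact this ((pvCnt_pos_iff s t j' kN).mpr hnn)
        simp [hz]
      rw [hentry]
      rw [if_neg (by simp [hne2])]
      rw [PySem.List.slice_none_none]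
      simp only [PySem.List.slice_none_none, PySem.List.foldl_append_singleton_eq_map]
      rw [PySem.List.foldl_append_eq_flatMap, List.nil_append, List.flatMap_map]
      have hcongr : ∀ kN ∈ (List.range i).filter (fun kN : Nat => 0 < pvCnt s t j' kN),
          (getTraceback T ((j' : Int), (kN : Int)) none f).map (· ++ [(i : Int)])
          = (pvEmb s t j' kN).map (· ++ [(i : Int)]) := by
        intro kN hkN
        rw [List.mem_filter] at hkN
        have hkNi : kN < i := by simpa using hkN.1
        have hpos : 0 < pvCnt s t j' kN := by simpa using hkN.2
        rw [ih f kN (by omega) (by omega) hf ((pvCnt_pos_iff s t j' kN).mp hpos)]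
      rw [flatMap_congr_mem _ _ _ hcongr]
      rw [flatMap_filter_of_nil _ _ _ (fun kN _ hfal => by
        have : pvEmb s t j' kN = [] := by
          by_contra hnn
          have := (pvCnt_pos_iff s t j' kN).mpr hnn
          simp [this] at hfal
        simp [this])]
      simp [pvEmb, hm]

theorem pvTval_succ_form (s t : List Char) (j' i : Nat) (hj : j' + 1 < t.length)
    (hi : i < s.length) (hm : pvMt s t (j' + 1) i = true) :
    pvTval s t (((j' + 1 : Nat) : Int), (i : Int))
      = ((List.range i).filter (fun kN : Nat => 0 < pvCnt s t j' kN)).map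
          (fun kN : Nat => ((j' : Int), (kN : Int))) := by
  have hcast : ((j' + 1 : Nat) : Int) - 1 = (j' : Int) := by push_cast; omega
  have hrange : PySem.List.pyRange (-1) (i : Int) 1 = -1 :: PySem.List.pyRange 0 (i : Int) 1 := by
    have := PySem.List.pyRange_one_cons (a := -1) (b := (i : Int)) (by omega)
    simpa using this
  have hrange2 : PySem.List.pyRange 0 (i : Int) 1 = (List.range i).map (fun k : Nat => (k : Int)) := by
    rw [PySem.List.pyRange_one]
    norm_num
  rw [pvTval_cast s t (j' + 1) i hj hi hm, hcast, hrange]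
  rw [List.filter_cons, if_neg (by simp [pvDval_snd_neg_one s t _ (Int.natCast_nonneg j')])]
  rw [hrange2, List.filter_map, List.map_map]
  congr 1
  apply List.filter_congr
  intro kN hkN
  simp only [List.mem_range] at hkN
  simp only [Function.comp_apply]
  rw [pvDval_cast s t j' kN (by omega) (by omega)]

theorem pvEmb_succ_ne_iff (s t : List Char) (j' i : Nat) (hm : pvMt s t (j' + 1) i = true) :
    pvEmb s t (j' + 1) i ≠ [] ↔
      ((List.range i).filter (fun kN : Nat => 0 < pvCnt s t j' kN)) ≠ [] := by
  simp only [pvEmb, hm, if_true]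
  rw [not_iff_not]
  rw [List.flatMap_eq_nil_iff, List.filter_eq_nil_iff]
  constructor
  · intro h kN hkN
    have := h kN hkN
    have hz : pvEmb s t j' kN = [] := by simpa using this
    simp [pvCnt, hz]
  · intro h kN hkN
    have := h kN hkN
    have hz : pvEmb s t j' kN = [] := by
      by_contra hnn
      have := (pvCnt_pos_iff s t j' kN).mpr hnn
      simp_all
    simp [hz]

-- The per-seed list both programs slice with [:limit]: [[]] for the virtual seed
-- (-1, -1), otherwise the embeddings of the last-but-one prefix ending at k.
def pvEP (s t : List Char) (pr : Int × Int) : List (List Int) :=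
  if pr.2 = -1 then [[]] else pvEmb s t (t.length - 2) pr.2.toNat

-- What A appends for one end position i (and what B appends too).
def pvTop (s t : List Char) (limit : Int) (i : Nat) : List (List Int) :=
  (PySem.List.slice (pvTval s t ((t.length : Int) - 1, (i : Int))) none (some limit)).flatMap
    (fun pr => (PySem.List.slice (pvEP s t pr) none (some limit)).map (· ++ [(i : Int)]))

theorem pvGtb_top (s t : List Char) (T : PySem.Dict (Int × Int) (List (Int × Int)))
    (hT : ∀ key, T.getD key [] = pvTval s t key) (limit : Int) (i : Nat)
    (hm0 : t.length ≠ 0) (hi : i < s.length) (hne : pvEmb s t (t.length - 1) i ≠ []) :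
    getTraceback T ((t.length : Int) - 1, (i : Int)) (some limit) (t.length + 1)
      = pvTop s t limit i := by
  have hcast : (t.length : Int) - 1 = ((t.length - 1 : Nat) : Int) := by push_cast; omega
  have hm : pvMt s t (t.length - 1) i = true := pvMt_of_emb_ne s t _ i hne
  obtain ⟨f, hf⟩ : ∃ f, t.length + 1 = f + 1 := ⟨t.length, rfl⟩
  rw [hf, getTraceback]
  have hentry : T.getD ((t.length : Int) - 1, (i : Int)) []
      = pvTval s t ((t.length : Int) - 1, (i : Int)) := hT _
  rw [hentry]
  have hne' : pvTval s t ((t.length : Int) - 1, (i : Int)) ≠ [] := by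
    rw [hcast]
    cases he : t.length - 1 with
    | zero =>
      rw [he] at hm
      rw [pvTval_zero s t i (by omega) hi hm]
      simp
    | succ j' =>
      rw [he] at hm hne
      rw [pvTval_succ_form s t j' i (by omega) hi hm]
      simp only [ne_eq, List.map_eq_nil_iff]
      exact (pvEmb_succ_ne_iff s t j' i hm).mp hne
  rw [if_neg (by simpa using hne')]
  simp only [PySem.List.foldl_append_singleton_eq_map]
  rw [PySem.List.foldl_append_eq_flatMap, List.nil_append]
  unfold pvTop
  apply flatMap_congr_mem
  intro pr hpr
  have hprmem : pr ∈ pvTval s t ((t.length : Int) - 1, (i : Int)) :=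
    PySem.List.mem_of_mem_slice _ _ _ hpr
  have hgtb : getTraceback T pr none f = pvEP s t pr := by
    rw [hcast] at hprmem
    cases he : t.length - 1 with
    | zero =>
      rw [he] at hprmem hm
      rw [pvTval_zero s t i (by omega) hi hm] at hprmem
      have : pr = (-1, -1) := by simpa using hprmem
      subst this
      obtain ⟨f', hf'⟩ : ∃ f', f = f' + 1 := ⟨t.length - 1, by omega⟩
      rw [hf', getTraceback]
      rw [hT _, pvTval_out s t _ (by norm_num)]
      simp [pvEP]
    | succ j' =>
      rw [he] at hprmem hm
      rw [pvTval_succ_form s t j' i (by omega) hi hm] at hprmem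
      simp only [List.mem_map, List.mem_filter, List.mem_range] at hprmem
      obtain ⟨kN, ⟨hkNi, hkNpos⟩, rfl⟩ := hprmem
      have hpos : 0 < pvCnt s t j' kN := by simpa using hkNpos
      have hj' : j' = t.length - 2 := by omega
      rw [pvGtb s t T hT j' f kN (by omega) (by omega) (by omega)
        ((pvCnt_pos_iff s t j' kN).mp hpos)]
      unfold pvEP
      rw [if_neg (by simp)]
      simp only [Int.toNat_natCast]
      rw [hj']
  rw [hgtb]

-- B side: the count rows.
def pvRow (s t : List Char) (j : Nat) : List Int :=
  (List.range s.length).map (fun i => pvCnt s t j i)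

-- B side: the prefix-sum list before processing row J.
def pvPrefA (s t : List Char) (J : Nat) : List Int :=
  if J = 0 then List.replicate (s.length + 1) 1
  else (List.range (s.length + 1)).map (fun i => ((List.range i).map (fun k => pvCnt s t (J - 1) k)).sum)

theorem pvCnt_succ_nat (s t : List Char) (j' i : Nat) (hm : pvMt s t (j' + 1) i = true) :
    pvCnt s t (j' + 1) i = ((List.range i).map (fun k => pvCnt s t j' k)).sum := by
  simp only [pvCnt, pvEmb, hm, if_true]
  rw [List.length_flatMap]
  push_cast
  rw [List.map_map]
  congr 1
  apply List.map_congr_left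
  intro k _
  simp [pvCnt]

theorem pvScan (l : List Int) :
    l.foldl (fun pref c => pref ++ [PySem.List.pyGetD pref (-1) 0 + c]) [(0 : Int)]
      = (List.range (l.length + 1)).map (fun i => (l.take i).sum) := by
  induction l using List.reverseRecOn with
  | nil => simp
  | append_singleton l c ih =>
    rw [List.foldl_append, List.foldl_cons, List.foldl_nil, ih]
    have hlast : PySem.List.pyGetD
        ((List.range (l.length + 1)).map (fun i => (l.take i).sum)) (-1) 0 = l.sum := by
      rw [PySem.List.pyGetD_neg_ofNat _ 1 0 (by omega) (by simp)]
      simp only [List.length_map, List.length_range, Nat.add_sub_cancel, List.getElem_map,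
        List.getElem_range]
      rw [List.take_of_length_le (le_refl _)]
    rw [hlast]
    have hlen : (l ++ [c]).length = l.length + 1 := by simp
    rw [hlen]
    conv_rhs => rw [List.range_succ]
    rw [List.map_append]
    congr 1
    · apply List.map_congr_left
      intro i hi
      simp only [List.mem_range] at hi
      rw [List.take_append_of_le_length (by omega)]
    · simp

theorem pvPrefA_getD (s t : List Char) (J i : Nat) (hi : i < s.length + 1) :
    (pvPrefA s t J).getD i 0
      = if J = 0 then 1 else ((List.range i).map (fun k => pvCnt s t (J - 1) k)).sum := by
  unfold pvPrefA
  by_cases hJ : J = 0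
  · simp [hJ, List.getD, hi]
  · rw [if_neg hJ, if_neg hJ]
    simp [List.getD, hi]

theorem pvBeq_comm {α : Type} [BEq α] [LawfulBEq α] (a b : α) : (a == b) = (b == a) := by
  by_cases h : a = b
  · simp [h]
  · simp [h, Ne.symm h]

theorem pvRow_val (s t : List Char) (j i : Nat) (hj : j < t.length) (hi : i < s.length) :
    (if PySem.List.pyGet? s (i : Int) == PySem.List.pyGet? t (j : Int)
      then PySem.List.pyGetD (pvPrefA s t j) (i : Int) 0 else 0) = pvCnt s t j i := by
  have hmt : (PySem.List.pyGet? s (i : Int) == PySem.List.pyGet? t (j : Int)) = pvMt s t j i := by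
    unfold pvMt
    exact pvBeq_comm _ _
  rw [hmt]
  by_cases hm : pvMt s t j i
  · rw [if_pos hm]
    have : PySem.List.pyGetD (pvPrefA s t j) ((i : Nat) : Int) 0 = (pvPrefA s t j).getD i 0 :=
      PySem.List.pyGetD_natCast _ _ _
    rw [this, pvPrefA_getD s t j i (by omega)]
    cases j with
    | zero => simp [pvCnt, pvEmb, hm]
    | succ j' =>
      rw [if_neg (by omega), pvCnt_succ_nat s t j' i hm]
      congr 1
  · rw [if_neg (by simp [hm]), pvCnt, pvEmb_nil_of_not_match s t j i (by simpa using hm)]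
    simp

-- The row/prefix build loop of B.
theorem pvRowsBuild (s t : List Char) (J : Int) (hJ0 : 0 ≤ J) (hJm : J ≤ (t.length : Int)) :
    ((PySem.List.pyRange 0 J 1).foldl (fun st j =>
        let row := (PySem.List.pyRange 0 (s.length : Int) 1).foldl (fun row i =>
            row ++ [if PySem.List.pyGet? s i == PySem.List.pyGet? t j then PySem.List.pyGetD st.2 i 0 else 0]) []
        let rows := st.1 ++ [row]
        let pref := row.foldl (fun pref c => pref ++ [PySem.List.pyGetD pref (-1) 0 + c]) [(0 : Int)]
        (rows, pref)) (([] : List (List Int)), List.replicate (s.length + 1) (1 : Int)))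
      = ((List.range J.toNat).map (pvRow s t), pvPrefA s t J.toNat) := by
  induction J, hJ0 using Int.le_induction with
  | base =>
    rw [PySem.List.pyRange_one_eq_nil (a := 0) (b := 0) (by omega)]
    rw [List.foldl_nil]
    unfold pvPrefA
    norm_num
  | succ J hJ ih =>
    rw [PySem.List.pyRange_one_succ_right (by omega), List.foldl_append, ih (by omega),
      List.foldl_cons, List.foldl_nil]
    simp only []
    obtain ⟨jN, rfl⟩ : ∃ jN : Nat, J = (jN : Int) := ⟨J.toNat, by omega⟩
    have hjN : jN < t.length := by omega
    have hrow : (PySem.List.pyRange 0 (s.length : Int) 1).foldl (fun row i =>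
        row ++ [if PySem.List.pyGet? s i == PySem.List.pyGet? t (jN : Int)
          then PySem.List.pyGetD (pvPrefA s t (jN : Int).toNat) i 0 else 0]) []
        = pvRow s t jN := by
      rw [PySem.List.foldl_append_singleton_eq_map, List.nil_append]
      have hrange2 : PySem.List.pyRange 0 ((s.length : Nat) : Int) 1
          = (List.range s.length).map (fun k : Nat => (k : Int)) := by
        rw [PySem.List.pyRange_one]
        norm_num
      rw [hrange2, List.map_map]
      unfold pvRow
      apply List.map_congr_left
      intro i hi
      simp only [List.mem_range] at hi
      simp only [Function.comp_apply, Int.toNat_natCast]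
      exact pvRow_val s t jN i hjN hi
    simp only [Int.toNat_natCast] at hrow ⊢
    rw [hrow, pvScan (pvRow s t jN)]
    rw [Prod.mk.injEq]
    refine ⟨?_, ?_⟩
    · rw [show (jN : Int) + 1 = ((jN + 1 : Nat) : Int) by push_cast; ring]
      rw [Int.toNat_natCast, List.range_succ, List.map_append]
      simp
    · rw [show (jN : Int) + 1 = ((jN + 1 : Nat) : Int) by push_cast; ring]
      rw [Int.toNat_natCast]
      unfold pvPrefA pvRow
      rw [if_neg (by omega)]
      simp only [List.length_map, List.length_range, Nat.add_sub_cancel]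
      apply List.map_congr_left
      intro i hi
      simp only [List.mem_range] at hi
      rw [← List.map_take, List.take_range, show min i s.length = i by omega]

theorem pvRows_getD (s t : List Char) (j : Nat) (hj : j < t.length) :
    PySem.List.pyGetD ((List.range t.length).map (pvRow s t)) ((j : Nat) : Int) []
      = pvRow s t j := by
  rw [PySem.List.pyGetD_natCast]
  simp [List.getD, hj]

theorem pvRow_getD (s t : List Char) (j : Nat) (k : Int) (hk0 : 0 ≤ k)
    (hkn : k < (s.length : Int)) :
    PySem.List.pyGetD (pvRow s t j) k 0 = pvCnt s t j k.toNat := by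
  obtain ⟨kN, rfl⟩ : ∃ kN : Nat, k = (kN : Int) := ⟨k.toNat, by omega⟩
  rw [PySem.List.pyGetD_natCast, Int.toNat_natCast]
  unfold pvRow
  simp [List.getD, show kN < s.length by omega]

-- Concatenation of the first p predecessor blocks for an end position k.
def pvBlocks (s t : List Char) (j' k p : Nat) : List (List Int) :=
  (List.range p).flatMap (fun k' => (pvEmb s t j' k').map (· ++ [((k : Nat) : Int)]))

theorem pvBlocks_succ (s t : List Char) (j' k p : Nat) :
    pvBlocks s t j' k (p + 1)
      = pvBlocks s t j' k p ++ (pvEmb s t j' p).map (· ++ [((k : Nat) : Int)]) := by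
  unfold pvBlocks
  rw [List.range_succ, List.flatMap_append]
  simp

-- B's budgeted enumerator takes the first tt embeddings (in enumeration order).
theorem pvFirst (s t : List Char) (j : Nat) :
    j < t.length → ∀ (k : Nat), k < s.length → ∀ (tt : Int), 0 < pvCnt s t j k →
    firstPaths ((List.range t.length).map (pvRow s t)) j ((k : Nat) : Int) tt
      = (pvEmb s t j k).take tt.toNat := by
  induction j with
  | zero =>
    intro hj k hk tt hpos
    have hm : pvMt s t 0 k = true :=
      pvMt_of_emb_ne s t 0 k ((pvCnt_pos_iff s t 0 k).mp hpos)
    rw [firstPaths]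
    have hemb : pvEmb s t 0 k = [[(k : Int)]] := by simp [pvEmb, hm]
    by_cases htt : tt ≤ 0
    · rw [if_pos htt, hemb, show tt.toNat = 0 by omega, List.take_zero]
    · rw [if_neg htt, hemb, List.take_of_length_le (by simp; omega)]
  | succ j' ih =>
    intro hj k hk tt hpos
    have hm : pvMt s t (j' + 1) k = true :=
      pvMt_of_emb_ne s t (j' + 1) k ((pvCnt_pos_iff s t (j' + 1) k).mp hpos)
    rw [firstPaths]
    by_cases htt : tt ≤ 0
    · rw [if_pos htt, show tt.toNat = 0 by omega, List.take_zero]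
    · rw [if_neg htt]
      have htt' : 0 < tt := by omega
      have main : ∀ (P : Int), 0 ≤ P → P ≤ (k : Int) →
          ((PySem.List.pyRange 0 P 1).foldl (fun st k1 =>
            if st.2 then st
            else if PySem.List.pyGetD (PySem.List.pyGetD ((List.range t.length).map (pvRow s t)) ((j' : Nat) : Int) []) k1 0 > 0 then
              let out := st.1 ++ (firstPaths ((List.range t.length).map (pvRow s t)) j' k1 (tt - (st.1.length : Int))).map (· ++ [((k : Nat) : Int)])
              (out, decide ((out.length : Int) = tt))
            else st) (([] : List (List Int)), false))
          = ((pvBlocks s t j' k P.toNat).take tt.toNat,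
             decide (((min (pvBlocks s t j' k P.toNat).length tt.toNat : Nat) : Int) = tt)) := by
        intro P hP0
        induction P, hP0 using Int.le_induction with
        | base =>
          intro _
          rw [PySem.List.pyRange_one_eq_nil (a := 0) (b := 0) (by omega), List.foldl_nil]
          unfold pvBlocks
          simp only [Int.toNat_zero, List.range_zero, List.flatMap_nil, List.take_nil,
            List.length_nil, Nat.zero_min, Nat.cast_zero]
          rw [Prod.mk.injEq]
          refine ⟨rfl, ?_⟩
          rw [eq_comm, decide_eq_false_iff_not]
          omega
        | succ P hP ihP =>
          intro hPk
          rw [PySem.List.pyRange_one_succ_right (by omega), List.foldl_append,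
            ihP (by omega), List.foldl_cons, List.foldl_nil]
          obtain ⟨pN, rfl⟩ : ∃ pN : Nat, P = (pN : Int) := ⟨P.toNat, by omega⟩
          rw [show ((pN : Int) + 1).toNat = pN + 1 by omega, Int.toNat_natCast,
            pvBlocks_succ s t j' k pN]
          set B := pvBlocks s t j' k pN with hB
          set E := (pvEmb s t j' pN).map (· ++ [((k : Nat) : Int)]) with hE
          have hEd : E = (pvEmb s t j' pN).map (· ++ [((k : Nat) : Int)]) := hE
          simp only []
          by_cases hflag : ((min B.length tt.toNat : Nat) : Int) = tt
          · rw [if_pos (by simpa using hflag)]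
            have hlen : tt.toNat ≤ B.length := by omega
            rw [List.take_append, show tt.toNat - B.length = 0 by omega,
              List.take_zero, List.append_nil, Prod.mk.injEq]
            refine ⟨rfl, ?_⟩
            rw [decide_eq_decide, List.length_append]
            omega
          · rw [if_neg (by simpa using hflag)]
            have hBlt : B.length < tt.toNat := by omega
            have hBtake : B.take tt.toNat = B := List.take_of_length_le (by omega)
            have hc : PySem.List.pyGetD (PySem.List.pyGetD ((List.range t.length).map (pvRow s t)) ((j' : Nat) : Int) []) ((pN : Nat) : Int) 0
                = pvCnt s t j' pN := by
              rw [pvRows_getD s t j' (by omega), pvRow_getD s t j' _ (by omega) (by push_cast; omega)]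
              rw [Int.toNat_natCast]
            rw [hc]
            by_cases hcp : pvCnt s t j' pN > 0
            · rw [if_pos hcp]
              rw [hBtake]
              have hbud : (tt - (B.length : Int)).toNat = tt.toNat - B.length := by omega
              rw [ih (by omega) pN (by omega) _ hcp]
              have hEtake : ((pvEmb s t j' pN).take (tt - (B.length : Int)).toNat).map (· ++ [((k : Nat) : Int)])
                  = E.take (tt.toNat - B.length) := by
                rw [hEd, List.map_take, hbud]
              rw [hEtake, Prod.mk.injEq]
              have hout : B ++ E.take (tt.toNat - B.length) = (B ++ E).take tt.toNat := by
                rw [List.take_append, hBtake]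
              refine ⟨hout, ?_⟩
              rw [decide_eq_decide, List.length_append, List.length_take, List.length_append]
              omega
            · rw [if_neg hcp]
              have hE0 : E = [] := by
                rw [hEd]
                have : pvEmb s t j' pN = [] := by
                  by_contra hne
                  exact hcp ((pvCnt_pos_iff s t j' pN).mpr hne)
                simp [this]
              rw [hE0, List.append_nil, Prod.mk.injEq]
              exact ⟨rfl, rfl⟩
      have hfin := main (k : Int) (by omega) (le_refl _)
      rw [hfin]
      have hblocks : pvBlocks s t j' k ((k : Int)).toNat = pvEmb s t (j' + 1) k := by
        rw [Int.toNat_natCast]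
        simp [pvBlocks, pvEmb, hm]
      rw [hblocks]

-- What B appends for one end position i equals pvTop (the value A appends).
theorem pvAltBranch (s t : List Char) (limit : Int) (hlim : 0 ≤ limit) (i : Nat)
    (hm0 : t.length ≠ 0) (hi : i < s.length)
    (hpos : 0 < pvCnt s t (t.length - 1) i) (out : List (List Int)) :
    (if t.length = 1 then
       if 0 < limit then out ++ [[((i : Nat) : Int)]] else out
     else
       (PySem.List.slice ((PySem.List.pyRange 0 ((i : Nat) : Int) 1).foldl (fun acc k =>
           if PySem.List.pyGetD (PySem.List.pyGetD ((List.range t.length).map (pvRow s t)) ((t.length : Int) - 2) []) k 0 > 0 then acc ++ [k] else acc) []) none (some limit)).foldl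
         (fun out k => out ++ (firstPaths ((List.range t.length).map (pvRow s t)) (t.length - 2) k limit).map (· ++ [((i : Nat) : Int)])) out)
    = out ++ pvTop s t limit i := by
  have hm : pvMt s t (t.length - 1) i = true :=
    pvMt_of_emb_ne s t _ i ((pvCnt_pos_iff s t _ i).mp hpos)
  by_cases h1 : t.length = 1
  · rw [if_pos h1]
    have hTv : pvTval s t ((t.length : Int) - 1, (i : Int)) = [(-1, -1)] := by
      have hc : (t.length : Int) - 1 = ((0 : Nat) : Int) := by rw [h1]; norm_num
      rw [hc]
      exact pvTval_zero s t i (by omega) hi (by rw [h1] at hm; simpa using hm)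
    unfold pvTop
    rw [hTv, PySem.List.slice_to _ hlim]
    by_cases hl : 0 < limit
    · rw [if_pos hl]
      have htake : ([((-1 : Int), (-1 : Int))]).take limit.toNat = [(-1, -1)] :=
        List.take_of_length_le (by simp; omega)
      rw [htake]
      simp only [List.flatMap_cons, List.flatMap_nil, List.append_nil]
      have hEP : pvEP s t ((-1 : Int), (-1 : Int)) = [[]] := by simp [pvEP]
      rw [hEP, PySem.List.slice_to _ hlim]
      have htake2 : ([([] : List Int)]).take limit.toNat = [[]] :=
        List.take_of_length_le (by simp; omega)
      rw [htake2]
      simp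
    · rw [if_neg hl]
      rw [show limit.toNat = 0 by omega, List.take_zero]
      simp
  · rw [if_neg h1]
    obtain ⟨j', hj'⟩ : ∃ j', t.length = j' + 2 := ⟨t.length - 2, by omega⟩
    have hj2 : t.length - 2 = j' := by omega
    have hj1 : t.length - 1 = j' + 1 := by omega
    have hcast2 : (t.length : Int) - 2 = ((j' : Nat) : Int) := by rw [hj']; push_cast; ring
    have hmt : pvMt s t (j' + 1) i = true := by rw [← hj1]; exact hm
    have hpreds : (PySem.List.pyRange 0 ((i : Nat) : Int) 1).foldl (fun acc k =>
        if PySem.List.pyGetD (PySem.List.pyGetD ((List.range t.length).map (pvRow s t)) ((t.length : Int) - 2) []) k 0 > 0 then acc ++ [k] else acc) []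
        = ((List.range i).filter (fun kN : Nat => 0 < pvCnt s t j' kN)).map (fun kN : Nat => (kN : Int)) := by
      rw [PySem.List.foldl_append_ite_eq_filter, List.nil_append]
      have hrange2 : PySem.List.pyRange 0 ((i : Nat) : Int) 1
          = (List.range i).map (fun k : Nat => (k : Int)) := by
        rw [PySem.List.pyRange_one]
        norm_num
      rw [hrange2, List.filter_map]
      congr 1
      apply List.filter_congr
      intro kN hkN
      simp only [List.mem_range] at hkN
      simp only [Function.comp_apply]
      rw [hcast2, pvRows_getD s t j' (by omega),
        pvRow_getD s t j' _ (by omega) (by push_cast; omega), Int.toNat_natCast]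
    rw [hpreds]
    rw [PySem.List.slice_to _ hlim]
    rw [← List.map_take]
    rw [PySem.List.foldl_append_eq_flatMap, List.flatMap_map]
    unfold pvTop
    have hcast1 : (t.length : Int) - 1 = ((j' + 1 : Nat) : Int) := by rw [hj']; push_cast; ring
    rw [hcast1, pvTval_succ_form s t j' i (by omega) hi hmt]
    rw [PySem.List.slice_to _ hlim, ← List.map_take, List.flatMap_map]
    congr 1
    apply flatMap_congr_mem
    intro kN hkN
    have hkN' : kN ∈ (List.range i).filter (fun kN : Nat => 0 < pvCnt s t j' kN) :=
      List.mem_of_mem_take hkN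
    rw [List.mem_filter, List.mem_range] at hkN'
    obtain ⟨hkNi, hkNpos⟩ := hkN'
    have hpos' : 0 < pvCnt s t j' kN := by simpa using hkNpos
    rw [hj2, pvFirst s t j' (by omega) kN (by omega) limit hpos']
    have hEP : pvEP s t ((j' : Int), (kN : Int)) = pvEmb s t j' kN := by
      unfold pvEP
      rw [if_neg (by simp)]
      simp only [Int.toNat_natCast, hj2]
    rw [hEP, PySem.List.slice_to _ hlim, List.map_take]

theorem pvFoldConst {α β : Type} (l : List α) (f : β → α → β)
    (h : ∀ (acc : β) (x : α), x ∈ l → f acc x = acc) (init : β) : l.foldl f init = init := by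
  induction l generalizing init with
  | nil => rfl
  | cons x xs ih =>
    rw [List.foldl_cons, h init x (by simp)]
    exact ih (fun acc y hy => h acc y (by simp [hy])) init

theorem pvDval_out (s t : List Char) (key : Int × Int) (hne : key ≠ (-1, -1))
    (h : ¬ (0 ≤ key.1 ∧ key.1 < (t.length : Int) ∧ 0 ≤ key.2 ∧ key.2 < (s.length : Int))) :
    pvDval s t key = 0 := by
  simp [pvDval, hne, h]

-- The canonical per-end-position step both outer loops compute.
def pvStep (s t : List Char) (limit : Int) (paths : List (List Int)) (i : Int) : List (List Int) :=
  if 0 < pvCnt s t (t.length - 1) i.toNat then paths ++ pvTop s t limit i.toNat else paths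

theorem pvStep_nil (s t : List Char) (limit : Int) (hm0 : t.length = 0) :
    (PySem.List.pyRange 0 (s.length : Int) 1).foldl (pvStep s t limit) [] = [] := by
  have ht : t = [] := List.length_eq_zero_iff.mp hm0
  subst ht
  have h : ∀ (acc : List (List Int)) (i : Int), i ∈ PySem.List.pyRange 0 (s.length : Int) 1 →
      pvStep s [] limit acc i = acc := by
    intro acc i hi
    rw [PySem.List.mem_pyRange_one] at hi
    obtain ⟨iN, rfl⟩ : ∃ iN : Nat, i = (iN : Int) := ⟨i.toNat, by omega⟩
    have hiN : iN < s.length := by omega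
    have hmt : pvMt s [] 0 iN = false := by
      unfold pvMt
      rw [PySem.List.pyGet?_natCast, PySem.List.pyGet?_natCast]
      simp [List.getElem?_eq_getElem hiN]
    unfold pvStep
    rw [if_neg (by simp [pvCnt, pvEmb_nil_of_not_match s [] 0 iN hmt])]
  exact pvFoldConst _ _ h []

-- A's outer loop computes the canonical fold.
theorem pvOuterA (s t : List Char) (limit : Int)
    (D : PySem.Dict (Int × Int) Int) (T : PySem.Dict (Int × Int) (List (Int × Int)))
    (hD : ∀ key, D.getD key 0 = pvDval s t key)
    (hT : ∀ key, T.getD key [] = pvTval s t key) :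
    (PySem.List.pyRange 0 (s.length : Int) 1).foldl (fun paths i =>
      if D.getD ((t.length : Int) - 1, i) 0 > 0 then
        paths ++ getTraceback T ((t.length : Int) - 1, i) (some limit) (t.length + 1)
      else paths) []
    = (PySem.List.pyRange 0 (s.length : Int) 1).foldl (pvStep s t limit) [] := by
  apply PySem.List.foldl_congr_mem
  intro acc i hi
  rw [PySem.List.mem_pyRange_one] at hi
  obtain ⟨iN, rfl⟩ : ∃ iN : Nat, i = (iN : Int) := ⟨i.toNat, by omega⟩
  have hiN : iN < s.length := by omega
  by_cases hm0 : t.length = 0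
  · have ht : t = [] := List.length_eq_zero_iff.mp hm0
    subst ht
    have hg : D.getD ((List.length ([] : List Char) : Int) - 1, ((iN : Nat) : Int)) 0 = 0 := by
      rw [hD]
      apply pvDval_out
      · intro h
        rw [Prod.ext_iff] at h
        simp only [List.length_nil] at h
        omega
      · simp only [List.length_nil]
        intro h
        omega
    rw [hg]
    have hmt : pvMt s [] 0 iN = false := by
      unfold pvMt
      rw [PySem.List.pyGet?_natCast, PySem.List.pyGet?_natCast]
      simp [List.getElem?_eq_getElem hiN]
    unfold pvStep
    rw [if_neg (by omega), if_neg (by simp [pvCnt, pvEmb_nil_of_not_match s [] 0 iN hmt])]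
  · have hcast : (t.length : Int) - 1 = ((t.length - 1 : Nat) : Int) := by omega
    have hg : D.getD ((t.length : Int) - 1, ((iN : Nat) : Int)) 0 = pvCnt s t (t.length - 1) iN := by
      rw [hD, hcast, pvDval_cast s t (t.length - 1) iN (by omega) hiN]
    rw [hg]
    unfold pvStep
    simp only [Int.toNat_natCast]
    by_cases hpos : 0 < pvCnt s t (t.length - 1) iN
    · rw [if_pos hpos, if_pos hpos]
      rw [pvGtb_top s t T hT limit iN hm0 hiN ((pvCnt_pos_iff s t (t.length - 1) iN).mp hpos)]
    · rw [if_neg hpos, if_neg hpos]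

-- B's outer loop (with its count table) computes the canonical fold.
theorem pvOuterB (s t : List Char) (limit : Int) (hlim : 0 ≤ limit)
    (rows : List (List Int)) (hrows : rows = (List.range t.length).map (pvRow s t)) :
    (if t.length = 0 then [] else
      (PySem.List.pyRange 0 (s.length : Int) 1).foldl (fun out i =>
        if PySem.List.pyGetD (PySem.List.pyGetD rows ((t.length : Int) - 1) []) i 0 > 0 then
          if t.length = 1 then
            if 0 < limit then out ++ [[i]] else out
          else
            (PySem.List.slice ((PySem.List.pyRange 0 i 1).foldl (fun acc k =>
              if PySem.List.pyGetD (PySem.List.pyGetD rows ((t.length : Int) - 2) []) k 0 > 0 then acc ++ [k] else acc) []) none (some limit)).foldl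
              (fun out k => out ++ (firstPaths rows (t.length - 2) k limit).map (· ++ [i])) out
        else out) [])
    = (PySem.List.pyRange 0 (s.length : Int) 1).foldl (pvStep s t limit) [] := by
  subst hrows
  by_cases hm0 : t.length = 0
  · rw [if_pos hm0, pvStep_nil s t limit hm0]
  · rw [if_neg hm0]
    apply PySem.List.foldl_congr_mem
    intro acc i hi
    rw [PySem.List.mem_pyRange_one] at hi
    obtain ⟨iN, rfl⟩ : ∃ iN : Nat, i = (iN : Int) := ⟨i.toNat, by omega⟩
    have hiN : iN < s.length := by omega
    have hcast : (t.length : Int) - 1 = ((t.length - 1 : Nat) : Int) := by omega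
    have hg : PySem.List.pyGetD (PySem.List.pyGetD ((List.range t.length).map (pvRow s t)) ((t.length : Int) - 1) []) ((iN : Nat) : Int) 0
        = pvCnt s t (t.length - 1) iN := by
      rw [hcast, pvRows_getD s t (t.length - 1) (by omega),
        pvRow_getD s t (t.length - 1) _ (by omega) (by push_cast; omega), Int.toNat_natCast]
    rw [hg]
    unfold pvStep
    simp only [Int.toNat_natCast]
    by_cases hpos : 0 < pvCnt s t (t.length - 1) iN
    · rw [if_pos hpos, if_pos hpos]
      rw [pvAltBranch s t limit hlim iN hm0 hiN hpos acc]
    · rw [if_neg hpos, if_neg hpos]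

-- ===== VERDICT (by name: the statement is the Claim_ definition above) =====
theorem subsequences_spec : Claim_equal_subsequences := by
  intro string subsequence limit _hDom hPre
  unfold Spec_subsequences
  have hA : subsequences string subsequence limit
      = (PySem.List.pyRange 0 (string.toList.length : Int) 1).foldl
          (pvStep string.toList subsequence.toList limit) [] := by
    obtain ⟨hD, hT⟩ := pvBuild string.toList subsequence.toList
    exact pvOuterA string.toList subsequence.toList limit _ _ hD hT
  have hB : subsequences_alt string subsequence limit
      = (PySem.List.pyRange 0 (string.toList.length : Int) 1).foldl
          (pvStep string.toList subsequence.toList limit) [] := by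
    have hRows := pvRowsBuild string.toList subsequence.toList
      (subsequence.toList.length : Int) (Int.natCast_nonneg _) (le_refl _)
    exact pvOuterB string.toList subsequence.toList limit hPre _ (by rw [hRows]; simp)
  rw [hA, hB]
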